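-- pv_equiv track=rewrite | github.com/yves-chevallier/texsmith | scripts/generate_noto_dataset.py | find_script_for_class
-- ===== SOURCE A (Python) =====
-- from collections.abc import Iterable, Sequence
--
-- def find_script_for_class(
--     block_tokens: Sequence[str], aliases: dict[str, list[list[str]]]
-- ) -> str | None:
--     token_set = set(block_tokens)
--     matches: list[tuple[int, str]] = []
--     for script_id, patterns in aliases.items():
--         for alias in patterns:
--             alias_set = set(alias)
--             if alias_set and alias_set <= token_set:
--                 matches.append((len(alias_set), script_id))
--     if not matches:
--         return None
--     matches.sort(key=lambda item: (-item[0], item[1]))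
--     return matches[0][1]
-- ===== SOURCE B (Python) =====
-- def find_script_for_class(block_tokens, aliases):
--     token_set = set(block_tokens)
--     best = None  # running (best_len, best_id); no matches list, no sort
--     for script_id, patterns in aliases.items():
--         for alias in patterns:
--             alias_set = set(alias)
--             if not alias_set or not alias_set <= token_set:
--                 continue
--             n = len(alias_set)
--             if best is None or n > best[0] or (n == best[0] and script_id < best[1]):
--                 best = (n, script_id)
--     return None if best is None else best[1]
-- ===== Notes on version B (the rewrite author's own statement) =====
-- stated objective: alternative
-- what changed: Drops the matches list and the final sort: a single pass keeps a running best (len, script_id) pair, updating only on strict improvement (longer, or equal length and lexicographically smaller id).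
import Mathlib
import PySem

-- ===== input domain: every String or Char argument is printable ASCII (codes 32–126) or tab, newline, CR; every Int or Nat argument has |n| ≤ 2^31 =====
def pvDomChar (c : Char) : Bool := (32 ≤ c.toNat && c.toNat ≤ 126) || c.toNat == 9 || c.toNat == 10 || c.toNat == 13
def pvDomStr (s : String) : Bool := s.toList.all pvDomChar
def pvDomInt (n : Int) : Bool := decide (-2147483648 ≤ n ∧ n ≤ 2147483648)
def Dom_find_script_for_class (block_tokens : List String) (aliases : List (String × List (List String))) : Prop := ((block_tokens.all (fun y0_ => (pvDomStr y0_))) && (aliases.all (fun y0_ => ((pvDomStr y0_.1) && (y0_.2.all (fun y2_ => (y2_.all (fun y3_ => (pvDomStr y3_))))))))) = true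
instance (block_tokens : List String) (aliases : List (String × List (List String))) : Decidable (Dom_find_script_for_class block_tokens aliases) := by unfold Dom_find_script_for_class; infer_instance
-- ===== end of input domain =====

-- B replaces A's collect-all-matches-then-sort with a single running best updated on strict
-- improvement (no intermediate list, no sort); return values proved equal everywhere.

-- ===== PORT A =====
-- sort key lambda (-item[0], item[1]): Python tuple comparison is lexicographic = Lex order
def pvSortKey (item : Int × String) : Lex (Int × String) := toLex (-item.1, item.2)

def find_script_for_class (block_tokens : List String) (aliases : List (String × List (List String))) : Option String :=
  let token_set := PySem.Set.ofList block_tokens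
  -- aliases.items(): the dict built from the pairs, iterated in insertion order
  let matchesL : List (Int × String) :=
    (PySem.Dict.ofList aliases).items.foldl (fun acc p =>
      p.2.foldl (fun acc al =>
        if !(PySem.Set.ofList al).isEmpty && PySem.Set.issubset (PySem.Set.ofList al) token_set then
          acc ++ [(PySem.Set.len (PySem.Set.ofList al), p.1)]
        else acc) acc) []
  if matchesL.isEmpty then none
  else
    match PySem.List.sorted matchesL pvSortKey with
    | [] => none
    | m :: _ => some m.2

-- ===== PORT B =====
def find_script_for_class_alt (block_tokens : List String) (aliases : List (String × List (List String))) : Option String :=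
  let token_set := PySem.Set.ofList block_tokens
  let best :=
    (PySem.Dict.ofList aliases).items.foldl (fun best p =>
      p.2.foldl (fun best al =>
        if !(!(PySem.Set.ofList al).isEmpty && PySem.Set.issubset (PySem.Set.ofList al) token_set) then best
        else
          match best with
          | none => some (PySem.Set.len (PySem.Set.ofList al), p.1)
          | some b =>
            if PySem.Set.len (PySem.Set.ofList al) > b.1 ∨ (PySem.Set.len (PySem.Set.ofList al) = b.1 ∧ p.1 < b.2) then
              some (PySem.Set.len (PySem.Set.ofList al), p.1)
            else some b)
        best) (none : Option (Int × String))
  best.map (·.2)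

-- ===== PRECONDITION & SPEC =====
def Spec_find_script_for_class (block_tokens : List String) (aliases : List (String × List (List String))) (out : Option String) : Prop := out = find_script_for_class_alt block_tokens aliases
instance (block_tokens : List String) (aliases : List (String × List (List String))) (out : Option String) : Decidable (Spec_find_script_for_class block_tokens aliases out) := by unfold Spec_find_script_for_class; infer_instance

-- ===== CLAIM (what is proved, stated in full; the proofs are below) =====
def Claim_equal_find_script_for_class : Prop := ∀ (block_tokens : List String) (aliases : List (String × List (List String))), Dom_find_script_for_class block_tokens aliases → Spec_find_script_for_class block_tokens aliases (find_script_for_class block_tokens aliases)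

-- ===== LEMMAS AND PROOFS =====

-- the per-alias candidate (length, script_id), none if the alias does not match
def pvCand (tok : PySem.Set String) (id : String) (al : List String) : Option (Int × String) :=
  if !(PySem.Set.ofList al).isEmpty && PySem.Set.issubset (PySem.Set.ofList al) tok then
    some (PySem.Set.len (PySem.Set.ofList al), id)
  else none

def pvMatches (tok : PySem.Set String) (items : List (String × List (List String))) : List (Int × String) :=
  items.flatMap (fun p => p.2.filterMap (pvCand tok p.1))

def pvStep (best : Option (Int × String)) (m : Int × String) : Option (Int × String) :=
  match best with
  | none => some m
  | some b => if m.1 > b.1 ∨ (m.1 = b.1 ∧ m.2 < b.2) then some m else some b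

lemma pvKey_lt_iff (m b : Int × String) :
    (m.1 > b.1 ∨ (m.1 = b.1 ∧ m.2 < b.2)) ↔ pvSortKey m < pvSortKey b := by
  unfold pvSortKey
  rw [Prod.Lex.toLex_lt_toLex]
  constructor
  · rintro (h | ⟨h1, h2⟩)
    · exact Or.inl (by omega)
    · exact Or.inr ⟨by omega, h2⟩
  · rintro (h | ⟨h1, h2⟩)
    · exact Or.inl (by omega)
    · exact Or.inr ⟨by omega, h2⟩

lemma pvKey_inj (m b : Int × String) (h : pvSortKey m = pvSortKey b) : m = b := by
  unfold pvSortKey at h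
  have h' := toLex.injective h
  obtain ⟨h1, h2⟩ := Prod.ext_iff.mp h'
  exact Prod.ext (by omega) h2

lemma pvStep_some (ms : List (Int × String)) (b : Int × String) :
    ∃ c, List.foldl pvStep (some b) ms = some c ∧ (c = b ∨ c ∈ ms) ∧
      pvSortKey c ≤ pvSortKey b ∧ ∀ y ∈ ms, pvSortKey c ≤ pvSortKey y := by
  induction ms generalizing b with
  | nil => exact ⟨b, rfl, Or.inl rfl, le_refl _, by simp⟩
  | cons m t ih =>
    by_cases h : m.1 > b.1 ∨ (m.1 = b.1 ∧ m.2 < b.2)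
    · obtain ⟨c, hc, hmem, hle, hall⟩ := ih m
      have hstep : pvStep (some b) m = some m := by
        show (if m.1 > b.1 ∨ (m.1 = b.1 ∧ m.2 < b.2) then some m else some b) = some m
        rw [if_pos h]
      have hmb : pvSortKey m < pvSortKey b := (pvKey_lt_iff m b).mp h
      refine ⟨c, ?_, ?_, le_of_lt (lt_of_le_of_lt hle hmb), ?_⟩
      · rw [List.foldl_cons, hstep]; exact hc
      · rcases hmem with h' | h'
        · exact Or.inr (by simp [h'])
        · exact Or.inr (List.mem_cons_of_mem _ h')
      · intro y hy
        rcases List.mem_cons.mp hy with h' | h'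
        · exact h' ▸ hle
        · exact hall y h'
    · obtain ⟨c, hc, hmem, hle, hall⟩ := ih b
      have hstep : pvStep (some b) m = some b := by
        show (if m.1 > b.1 ∨ (m.1 = b.1 ∧ m.2 < b.2) then some m else some b) = some b
        rw [if_neg h]
      have hbm : pvSortKey b ≤ pvSortKey m := le_of_not_gt (fun hlt => h ((pvKey_lt_iff m b).mpr hlt))
      refine ⟨c, ?_, ?_, hle, ?_⟩
      · rw [List.foldl_cons, hstep]; exact hc
      · rcases hmem with h' | h'
        · exact Or.inl h'
        · exact Or.inr (List.mem_cons_of_mem _ h')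
      · intro y hy
        rcases List.mem_cons.mp hy with h' | h'
        · exact h' ▸ le_trans hle hbm
        · exact hall y h'

lemma pvStep_none (ms : List (Int × String)) :
    (ms = [] ∧ List.foldl pvStep none ms = none) ∨
    ∃ c, List.foldl pvStep none ms = some c ∧ c ∈ ms ∧ ∀ y ∈ ms, pvSortKey c ≤ pvSortKey y := by
  cases ms with
  | nil => exact Or.inl ⟨rfl, rfl⟩
  | cons m t =>
    obtain ⟨c, hc, hmem, hle, hall⟩ := pvStep_some t m
    refine Or.inr ⟨c, hc, ?_, ?_⟩
    · rcases hmem with h' | h'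
      · simp [h']
      · exact List.mem_cons_of_mem _ h'
    · intro y hy
      rcases List.mem_cons.mp hy with h' | h'
      · exact h' ▸ hle
      · exact hall y h'

-- A's inner loop appends the matching candidates
lemma pvInnerA (tok : PySem.Set String) (id : String) (pats : List (List String)) (acc : List (Int × String)) :
    pats.foldl (fun acc al =>
        if !(PySem.Set.ofList al).isEmpty && PySem.Set.issubset (PySem.Set.ofList al) tok then
          acc ++ [(PySem.Set.len (PySem.Set.ofList al), id)]
        else acc) acc = acc ++ pats.filterMap (pvCand tok id) := by
  induction pats generalizing acc with
  | nil => simp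
  | cons a t ih =>
    rw [List.foldl_cons]
    by_cases h : (!(PySem.Set.ofList a).isEmpty && PySem.Set.issubset (PySem.Set.ofList a) tok) = true
    · have hcand : pvCand tok id a = some (PySem.Set.len (PySem.Set.ofList a), id) := by
        unfold pvCand; rw [if_pos h]
      rw [List.filterMap_cons_some hcand, ih]
      show (if _ then acc ++ [(PySem.Set.len (PySem.Set.ofList a), id)] else acc) ++ _ = _
      rw [if_pos h, List.append_assoc]
      rfl
    · have hcand : pvCand tok id a = none := by
        unfold pvCand; rw [if_neg h]
      rw [List.filterMap_cons_none hcand, ih]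
      show (if _ then acc ++ [(PySem.Set.len (PySem.Set.ofList a), id)] else acc) ++ _ = _
      rw [if_neg h]

lemma pvMatchesA (tok : PySem.Set String) (items : List (String × List (List String))) (acc : List (Int × String)) :
    items.foldl (fun acc p =>
      p.2.foldl (fun acc al =>
        if !(PySem.Set.ofList al).isEmpty && PySem.Set.issubset (PySem.Set.ofList al) tok then
          acc ++ [(PySem.Set.len (PySem.Set.ofList al), p.1)]
        else acc) acc) acc = acc ++ pvMatches tok items := by
  induction items generalizing acc with
  | nil => simp [pvMatches]
  | cons p t ih =>
    simp only [List.foldl_cons]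
    rw [pvInnerA, ih]
    simp [pvMatches, List.flatMap_cons, List.append_assoc]

-- B's inner loop is foldl pvStep over the matching candidates
lemma pvInnerB (tok : PySem.Set String) (id : String) (pats : List (List String)) (best : Option (Int × String)) :
    pats.foldl (fun best al =>
        if !(!(PySem.Set.ofList al).isEmpty && PySem.Set.issubset (PySem.Set.ofList al) tok) then best
        else
          match best with
          | none => some (PySem.Set.len (PySem.Set.ofList al), id)
          | some b =>
            if PySem.Set.len (PySem.Set.ofList al) > b.1 ∨ (PySem.Set.len (PySem.Set.ofList al) = b.1 ∧ id < b.2) then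
              some (PySem.Set.len (PySem.Set.ofList al), id)
            else some b)
      best = List.foldl pvStep best (pats.filterMap (pvCand tok id)) := by
  induction pats generalizing best with
  | nil => simp
  | cons a t ih =>
    rw [List.foldl_cons]
    by_cases h : (!(PySem.Set.ofList a).isEmpty && PySem.Set.issubset (PySem.Set.ofList a) tok) = true
    · have hcand : pvCand tok id a = some (PySem.Set.len (PySem.Set.ofList a), id) := by
        unfold pvCand; rw [if_pos h]
      rw [List.filterMap_cons_some hcand, ih, List.foldl_cons]
      congr 1
      show (if (!(!(PySem.Set.ofList a).isEmpty && PySem.Set.issubset (PySem.Set.ofList a) tok)) = true then best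
        else
          match best with
          | none => some (PySem.Set.len (PySem.Set.ofList a), id)
          | some b =>
            if PySem.Set.len (PySem.Set.ofList a) > b.1 ∨ (PySem.Set.len (PySem.Set.ofList a) = b.1 ∧ id < b.2) then
              some (PySem.Set.len (PySem.Set.ofList a), id)
            else some b) = pvStep best (PySem.Set.len (PySem.Set.ofList a), id)
      rw [if_neg (by simp [h])]
      cases best with
      | none => rfl
      | some b => rfl
    · have hcand : pvCand tok id a = none := by
        unfold pvCand; rw [if_neg h]
      rw [List.filterMap_cons_none hcand, ih]
      congr 1
      show (if (!(!(PySem.Set.ofList a).isEmpty && PySem.Set.issubset (PySem.Set.ofList a) tok)) = true then best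
        else
          match best with
          | none => some (PySem.Set.len (PySem.Set.ofList a), id)
          | some b =>
            if PySem.Set.len (PySem.Set.ofList a) > b.1 ∨ (PySem.Set.len (PySem.Set.ofList a) = b.1 ∧ id < b.2) then
              some (PySem.Set.len (PySem.Set.ofList a), id)
            else some b) = best
      rw [if_pos (by simp [h])]

lemma pvMatchesB (tok : PySem.Set String) (items : List (String × List (List String))) (best : Option (Int × String)) :
    items.foldl (fun best p =>
      p.2.foldl (fun best al =>
        if !(!(PySem.Set.ofList al).isEmpty && PySem.Set.issubset (PySem.Set.ofList al) tok) then best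
        else
          match best with
          | none => some (PySem.Set.len (PySem.Set.ofList al), p.1)
          | some b =>
            if PySem.Set.len (PySem.Set.ofList al) > b.1 ∨ (PySem.Set.len (PySem.Set.ofList al) = b.1 ∧ p.1 < b.2) then
              some (PySem.Set.len (PySem.Set.ofList al), p.1)
            else some b)
        best) best = List.foldl pvStep best (pvMatches tok items) := by
  induction items generalizing best with
  | nil => simp [pvMatches]
  | cons p t ih =>
    simp only [List.foldl_cons]
    rw [pvInnerB, ih]
    simp [pvMatches, List.flatMap_cons, List.foldl_append]

-- ===== VERDICT (by name: the statement is the Claim_ definition above) =====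
theorem find_script_for_class_spec : Claim_equal_find_script_for_class := by
  intro block_tokens aliases _
  unfold Spec_find_script_for_class find_script_for_class find_script_for_class_alt
  simp only
  rw [pvMatchesA, pvMatchesB]
  simp only [List.nil_append]
  set tok := PySem.Set.ofList block_tokens with htok
  set ms := pvMatches tok (PySem.Dict.ofList aliases).items with hms
  rcases pvStep_none ms with ⟨hnil, hfold⟩ | ⟨c, hfold, hmem, hall⟩
  · simp [hnil]
  · have hne : ms ≠ [] := fun h => by simp [h] at hmem
    have hnemp : ms.isEmpty = false := by simp [hne]
    rw [hnemp, hfold]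
    simp only [Bool.false_eq_true, if_false, Option.map_some]
    have hsne : PySem.List.sorted ms pvSortKey ≠ [] := by
      rw [Ne, PySem.List.sorted_eq_nil_iff]; exact hne
    cases hs : PySem.List.sorted ms pvSortKey with
    | nil => exact absurd hs hsne
    | cons m t =>
      have hmmem : m ∈ ms := by
        have : m ∈ PySem.List.sorted ms pvSortKey := by simp [hs]
        rwa [PySem.List.mem_sorted] at this
      have h1 : pvSortKey m ≤ pvSortKey c := PySem.List.key_head_sorted_le ms pvSortKey hs c hmem
      have h2 : pvSortKey c ≤ pvSortKey m := hall m hmmem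
      have : m = c := pvKey_inj m c (le_antisymm h1 h2)
      simp [this]
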